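-- pv_equiv track=rewrite | github.com/DDDdreamer/HappyThirteenWater | ThirteenWater.py | SanFenTianXia
-- ===== SOURCE A (Python) =====
-- def SanFenTianXia(cards):
--     boom = {'2':0,'3':0,'4':0,'5':0,'6':0,'7':0,'8':0,'9':0,'10':0,'J':0,'Q':0,'K':0,'A':0}
--     boom_num = 0
--     for lst_i in cards:
--         lst_i = lst_i.strip('*')
--         lst_i = lst_i.strip('#')
--         lst_i = lst_i.strip('&')
--         lst_i = lst_i.strip('$')
--         boom[lst_i] += 1
--         if boom[lst_i] == 4:
--             boom_num += 1
--     if boom_num == 3: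
--         return True
--     return False
-- ===== SOURCE B (Python) =====
-- RANKS = ['2', '3', '4', '5', '6', '7', '8', '9', '10', 'J', 'Q', 'K', 'A']
--
-- def SanFenTianXia(cards):
--     # sort by rank position so equal ranks sit adjacent, then one run-length scan
--     keys = sorted(RANKS.index(c.strip('*').strip('#').strip('&').strip('$')) for c in cards)
--     quads = 0
--     prev = None
--     run = 0
--     for x in keys:
--         if x == prev:
--             run += 1
--         else:
--             if run >= 4:
--                 quads += 1
--             prev = x
--             run = 1
--     if run >= 4:
--         quads += 1
--     return quads == 3
-- ===== Notes on version B (the rewrite author's own statement) =====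
-- stated objective: alternative
-- what changed: Replaced A's rank-keyed counting dict with the in-loop '== 4' trigger by a sort-then-scan: strip and sort the ranks so equal ranks sit adjacent, then a single run-length scan counts the maximal runs of length >= 4, with no counting table at all.
import Mathlib
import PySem

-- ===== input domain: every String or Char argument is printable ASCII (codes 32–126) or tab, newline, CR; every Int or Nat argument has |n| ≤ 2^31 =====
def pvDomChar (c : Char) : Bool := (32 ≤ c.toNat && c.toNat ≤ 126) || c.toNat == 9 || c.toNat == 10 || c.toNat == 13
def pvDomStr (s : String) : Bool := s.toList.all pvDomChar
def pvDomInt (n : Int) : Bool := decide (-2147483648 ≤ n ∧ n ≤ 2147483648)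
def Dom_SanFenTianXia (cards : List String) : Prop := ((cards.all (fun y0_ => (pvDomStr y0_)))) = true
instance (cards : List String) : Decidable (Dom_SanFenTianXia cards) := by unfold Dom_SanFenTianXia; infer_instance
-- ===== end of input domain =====

-- B replaces A's rank-keyed counting dict (with the in-loop '== 4' trigger) by a sort-then-scan:
-- strip and sort the ranks so equal ranks sit adjacent, then one run-length scan counts the
-- maximal runs of length >= 4; no counting table at all ("alternative").
-- Pre_ excludes exactly the hands on which A raises KeyError (a stripped card outside the 13 ranks).

-- the chain lst_i.strip('*').strip('#').strip('&').strip('$'), shared verbatim by both ports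
def pvStrip4 (s : String) : String :=
  PySem.Str.stripChars (PySem.Str.stripChars (PySem.Str.stripChars (PySem.Str.stripChars s "*") "#") "&") "$"

def pvRanks : List String := ["2","3","4","5","6","7","8","9","10","J","Q","K","A"]

-- ===== PORT A =====
def SanFenTianXia (cards : List String) : Bool :=
  let boom : PySem.Dict String Int :=
    PySem.Dict.ofList [("2",0),("3",0),("4",0),("5",0),("6",0),("7",0),("8",0),("9",0),("10",0),("J",0),("Q",0),("K",0),("A",0)]
  let st := cards.foldl (fun (st : PySem.Dict String Int × Int) lst_i =>
      let r := pvStrip4 lst_i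
      -- boom[lst_i] += 1  (Pre_ guarantees the key is present, so getD reads the stored count)
      let v := st.1.getD r 0 + 1
      let boom := st.1.insert r v
      let boom_num := if v == 4 then st.2 + 1 else st.2
      (boom, boom_num)) (boom, 0)
  if st.2 == 3 then true else false

-- ===== PORT B =====
-- RANKS.index(...) of Source B; the getD 0 default is only read where Python raises ValueError (outside Pre_)
def pvIdx (s : String) : Int := (((PySem.List.index? pvRanks s).getD 0 : Nat) : Int)

-- loop body of Source B's scan: state (quads, prev, run); prev = None is 'none'
def pvStep (st : Int × Option Int × Int) (x : Int) : Int × Option Int × Int :=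
  if some x == st.2.1 then (st.1, st.2.1, st.2.2 + 1)
  else ((if (4:Int) ≤ st.2.2 then st.1 + 1 else st.1), some x, 1)

def SanFenTianXia_alt (cards : List String) : Bool :=
  let keys := PySem.List.sorted (cards.map (fun c => pvIdx (pvStrip4 c))) (fun x => x) false
  let st := keys.foldl pvStep (0, none, 0)
  let quads := if (4:Int) ≤ st.2.2 then st.1 + 1 else st.1
  decide (quads = 3)

-- ===== PRECONDITION & SPEC =====
-- Pre_ excludes exactly the inputs where A's 'boom[lst_i] += 1' raises KeyError (stripped card not a rank)
def Pre_SanFenTianXia (cards : List String) : Prop := ∀ c ∈ cards, pvStrip4 c ∈ pvRanks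
instance (cards : List String) : Decidable (Pre_SanFenTianXia cards) := by unfold Pre_SanFenTianXia; infer_instance

def pvWitness_SanFenTianXia : List String := ["2","2","*2*","2#","3","3","3","3$","A","A","A","A","5"]

def Spec_SanFenTianXia (cards : List String) (out : Bool) : Prop := out = SanFenTianXia_alt cards
instance (cards : List String) (out : Bool) : Decidable (Spec_SanFenTianXia cards out) := by unfold Spec_SanFenTianXia; infer_instance

-- ===== CLAIM (what is proved, stated in full; the proofs are below) =====
def Claim_equal_SanFenTianXia : Prop := ∀ (cards : List String), Dom_SanFenTianXia cards → Pre_SanFenTianXia cards → Spec_SanFenTianXia cards (SanFenTianXia cards)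
-- ===== LEMMAS AND PROOFS =====

-- countP of two predicates differing only at one member of a Nodup list
theorem pv_countP_single_diff {α : Type} [DecidableEq α] (s : α) (p q : α → Bool)
    (himp : q s = true → p s = true) :
    ∀ (l : List α), l.Nodup → s ∈ l → (∀ r ∈ l, r ≠ s → p r = q r) →
    l.countP p = l.countP q + (if p s = true ∧ q s = false then 1 else 0) := by
  intro l
  induction l with
  | nil => intro _ hs; cases hs
  | cons h t ih =>
    intro hnd hs hoff
    rcases List.mem_cons.mp hs with rfl | hst
    · have hpq : t.countP p = t.countP q := by
        apply List.countP_congr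
        intro r hr
        rw [hoff r (List.mem_cons_of_mem _ hr) (fun he => (List.nodup_cons.mp hnd).1 (he ▸ hr))]
      simp only [List.countP_cons, hpq]
      cases hq : q s with
      | true => simp [himp hq]
      | false =>
        cases hp : p s with
        | true => simp
        | false => simp
    · have hne : h ≠ s := fun he => (List.nodup_cons.mp hnd).1 (he ▸ hst)
      have := ih (List.nodup_cons.mp hnd).2 hst (fun r hr hrne => hoff r (List.mem_cons_of_mem _ hr) hrne)
      simp only [List.countP_cons, this, hoff h (List.mem_cons_self) hne]
      omega

-- A's loop invariant: boom_num grows by the number of ranks that cross the 4-threshold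
theorem pv_loop_inv (rest : List String) :
    ∀ (d : PySem.Dict String Int) (n : Int),
    (∀ c ∈ rest, pvStrip4 c ∈ pvRanks) →
    (rest.foldl (fun (st : PySem.Dict String Int × Int) lst_i =>
      let r := pvStrip4 lst_i
      let v := st.1.getD r 0 + 1
      let boom := st.1.insert r v
      let boom_num := if v == 4 then st.2 + 1 else st.2
      (boom, boom_num)) (d, n)).2
    = n + (pvRanks.countP (fun r =>
        decide (d.getD r 0 < 4 ∧ 4 ≤ d.getD r 0 + ((rest.map pvStrip4).count r : Int))) : Int) := by
  induction rest with
  | nil =>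
    intro d n _
    have h0 : (pvRanks.countP (fun r =>
        decide (d.getD r 0 < 4 ∧ 4 ≤ d.getD r 0 + ((([] : List String).map pvStrip4).count r : Int)))) = 0 := by
      apply List.countP_eq_zero.mpr
      intro r _
      simp only [List.map_nil, List.count_nil, decide_eq_true_eq]
      push_cast
      omega
    rw [h0]
    simp
  | cons c rest' ih =>
    intro d n hpre
    have hs : pvStrip4 c ∈ pvRanks := hpre c List.mem_cons_self
    have hpre' : ∀ x ∈ rest', pvStrip4 x ∈ pvRanks := fun x hx => hpre x (List.mem_cons_of_mem _ hx)
    simp only [List.foldl_cons]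
    rw [ih _ _ hpre']
    have key := pv_countP_single_diff (pvStrip4 c)
      (fun r => decide (d.getD r 0 < 4 ∧ 4 ≤ d.getD r 0 + (((c :: rest').map pvStrip4).count r : Int)))
      (fun r => decide ((d.insert (pvStrip4 c) (d.getD (pvStrip4 c) 0 + 1)).getD r 0 < 4 ∧
        4 ≤ (d.insert (pvStrip4 c) (d.getD (pvStrip4 c) 0 + 1)).getD r 0 + ((rest'.map pvStrip4).count r : Int)))
      (by
        simp only [PySem.Dict.getD_insert_self, List.map_cons, List.count_cons, BEq.rfl, decide_eq_true_eq]
        push_cast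
        omega)
      pvRanks (by decide) hs
      (by
        intro r _ hr
        have hb : (pvStrip4 c == r) = false := by simp [Ne.symm hr]
        simp only [PySem.Dict.getD_insert, if_neg hr, List.map_cons, List.count_cons, hb]
        rfl)
    rw [key]
    have harith : ((if (d.getD (pvStrip4 c) 0 + 1) == 4 then n + 1 else n) : Int)
        = n + (if (decide (d.getD (pvStrip4 c) 0 < 4 ∧ 4 ≤ d.getD (pvStrip4 c) 0 + (((c :: rest').map pvStrip4).count (pvStrip4 c) : Int))) = true ∧
               (decide ((d.insert (pvStrip4 c) (d.getD (pvStrip4 c) 0 + 1)).getD (pvStrip4 c) 0 < 4 ∧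
                 4 ≤ (d.insert (pvStrip4 c) (d.getD (pvStrip4 c) 0 + 1)).getD (pvStrip4 c) 0 + ((rest'.map pvStrip4).count (pvStrip4 c) : Int))) = false
               then 1 else 0) := by
      simp only [PySem.Dict.getD_insert_self, List.map_cons, List.count_cons, BEq.rfl, decide_eq_true_eq, decide_eq_false_iff_not, beq_iff_eq]
      push_cast
      split_ifs <;> omega
    push_cast
    rw [harith]
    ring

theorem pv_initial_getD (r : String) (hr : r ∈ pvRanks) :
    (PySem.Dict.ofList [("2",(0:Int)),("3",0),("4",0),("5",0),("6",0),("7",0),("8",0),("9",0),("10",0),("J",0),("Q",0),("K",0),("A",0)]).getD r 0 = 0 := by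
  simp only [pvRanks, List.mem_cons, List.not_mem_nil, or_false] at hr
  rcases hr with rfl|rfl|rfl|rfl|rfl|rfl|rfl|rfl|rfl|rfl|rfl|rfl|rfl <;> decide

-- the images of the 13 ranks under pvIdx (the sort keys), a Nodup list
def pvU : List Int := pvRanks.map pvIdx

-- counting a rank's key among mapped keys is counting the rank itself (pvIdx is injective on pvRanks)
theorem pv_count_idx (l : List String) (hl : ∀ s ∈ l, s ∈ pvRanks) (r : String) (hr : r ∈ pvRanks) :
    (l.map (fun s => pvIdx s)).count (pvIdx r) = l.count r := by
  induction l with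
  | nil => rfl
  | cons s t ih =>
    have hs : s ∈ pvRanks := hl s List.mem_cons_self
    have hinj : ∀ a ∈ pvRanks, ∀ b ∈ pvRanks, pvIdx a = pvIdx b ↔ a = b := by decide
    have hbeq : (pvIdx s == pvIdx r) = (s == r) := by
      by_cases h : s = r
      · subst h; simp
      · have h1 : (s == r) = false := beq_eq_false_iff_ne.mpr h
        have h2 : (pvIdx s == pvIdx r) = false :=
          beq_eq_false_iff_ne.mpr (fun he => h ((hinj s hs r hr).mp he))
        rw [h1, h2]
    simp only [List.map_cons, List.count_cons, hbeq,
      ih (fun x hx => hl x (List.mem_cons_of_mem _ hx))]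

-- B's scan invariant: on a sorted key list l with open run (p, k), the final quads value
-- is q plus the number of keys reaching 4, counting the open run's k for p
theorem pv_scan_eq : ∀ (l : List Int) (p : Int) (q k : Int),
    l.Pairwise (· ≤ ·) → (∀ x ∈ l, p ≤ x) → p ∈ pvU → (∀ x ∈ l, x ∈ pvU) →
    (let st := l.foldl pvStep (q, some p, k)
     if (4:Int) ≤ st.2.2 then st.1 + 1 else st.1)
    = q + (pvU.countP (fun r => decide ((4:Int) ≤ (if r = p then k else 0) + (l.count r : Int))) : Int) := by
  intro l
  induction l with
  | nil =>
    intro p q k _ _ hp _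
    have key := pv_countP_single_diff p
      (fun r => decide ((4:Int) ≤ (if r = p then k else 0) + (([] : List Int).count r : Int)))
      (fun _ => false)
      (by simp)
      pvU (by decide) hp
      (by intro r _ hr; simp [hr])
    rw [key]
    simp only [List.countP_false, List.count_nil, Nat.cast_zero, add_zero,
      decide_eq_true_eq, List.foldl_nil]
    split_ifs <;> simp_all
  | cons x xs ih =>
    intro p q k hsorted hge hp hmem
    have hxs : xs.Pairwise (· ≤ ·) := (List.pairwise_cons.mp hsorted).2
    have hxle : ∀ y ∈ xs, x ≤ y := (List.pairwise_cons.mp hsorted).1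
    have hmem' : ∀ y ∈ xs, y ∈ pvU := fun y hy => hmem y (List.mem_cons_of_mem _ hy)
    by_cases hxp : x = p
    · subst hxp
      -- run continues: state becomes (q, some x, k+1)
      have hstep : pvStep (q, some x, k) x = (q, some x, k + 1) := by
        simp [pvStep]
      simp only [List.foldl_cons, hstep]
      rw [ih x q (k + 1) hxs hxle hp hmem']
      congr 2
      apply List.countP_congr
      intro r _
      simp only [decide_eq_true_eq, List.count_cons]
      by_cases hrx : r = x
      · subst hrx
        simp only [BEq.rfl, if_true]
        push_cast; omega
      · have hb : (x == r) = false := beq_eq_false_iff_ne.mpr (fun h => hrx h.symm)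
        simp [hb, hrx]
    · -- run closes: state becomes (if 4 <= k then q+1 else q, some x, 1)
      have hpx : p < x := lt_of_le_of_ne (hge x List.mem_cons_self) (Ne.symm hxp)
      have hpx' : p ≠ x := fun h => hxp h.symm
      have hstep : pvStep (q, some p, k) x
          = ((if (4:Int) ≤ k then q + 1 else q), some x, 1) := by
        have hb : (some x == some p) = false := by simp [hxp]
        simp [pvStep, hb]
      have hx_mem : x ∈ pvU := hmem x List.mem_cons_self
      have hcpxs : xs.count p = 0 :=
        List.count_eq_zero.mpr (fun h => absurd (hxle p h) (not_le.mpr hpx))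
      have hcpl : (x :: xs).count p = 0 := by
        rw [List.count_cons, hcpxs]
        simp [hxp]
      simp only [List.foldl_cons, hstep]
      rw [ih x (if (4:Int) ≤ k then q + 1 else q) 1 hxs hxle hx_mem hmem']
      have key := pv_countP_single_diff p
        (fun r => decide ((4:Int) ≤ (if r = p then k else 0) + ((x :: xs).count r : Int)))
        (fun r => decide ((4:Int) ≤ (if r = x then 1 else 0) + (xs.count r : Int)))
        (by
          intro h
          simp only [if_neg hpx', hcpxs, Nat.cast_zero, add_zero, decide_eq_true_eq] at h
          omega)
        pvU (by decide) hp
        (by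
          intro r _ hrp
          refine decide_eq_decide.mpr ?_
          simp only [if_neg hrp, List.count_cons]
          by_cases hrx : r = x
          · subst hrx
            simp only [BEq.rfl, if_true]
            push_cast; omega
          · have hb : (x == r) = false := beq_eq_false_iff_ne.mpr (fun h => hrx h.symm)
            simp [hb, hrx])
      rw [key]
      have hnewp : (fun r => decide ((4:Int) ≤ (if r = x then 1 else 0) + (xs.count r : Int))) p
          = false := by
        simp only [if_neg hpx', hcpxs, Nat.cast_zero, add_zero]
        simp
      simp only [hnewp, decide_eq_true_eq, and_true]
      push_cast
      split_ifs <;> omega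

-- ===== VERDICT (by name: the statement is the Claim_ definition above) =====
theorem SanFenTianXia_spec : Claim_equal_SanFenTianXia := by
  intro cards _ hpre
  unfold Spec_SanFenTianXia SanFenTianXia SanFenTianXia_alt
  simp only []
  rw [pv_loop_inv cards _ 0 hpre]
  have hcp : (pvRanks.countP (fun r =>
      decide ((PySem.Dict.ofList [("2",(0:Int)),("3",0),("4",0),("5",0),("6",0),("7",0),("8",0),("9",0),("10",0),("J",0),("Q",0),("K",0),("A",0)]).getD r 0 < 4 ∧
        4 ≤ (PySem.Dict.ofList [("2",(0:Int)),("3",0),("4",0),("5",0),("6",0),("7",0),("8",0),("9",0),("10",0),("J",0),("Q",0),("K",0),("A",0)]).getD r 0 + ((cards.map pvStrip4).count r : Int))))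
      = pvRanks.countP (fun r => decide ((4:Int) ≤ (((cards.map pvStrip4).count r) : Int))) := by
    apply List.countP_congr
    intro r hr
    rw [pv_initial_getD r hr]
    simp only [decide_eq_true_eq]
    push_cast
    simp only [true_and]
    omega
  rw [hcp]
  have hkeys : cards.map (fun c => pvIdx (pvStrip4 c)) = (cards.map pvStrip4).map pvIdx := by
    rw [List.map_map]; rfl
  have hperm : (PySem.List.sorted (cards.map (fun c => pvIdx (pvStrip4 c))) (fun x => x) false).Perm
      (cards.map (fun c => pvIdx (pvStrip4 c))) := PySem.List.sorted_perm ..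
  have hpair : (PySem.List.sorted (cards.map (fun c => pvIdx (pvStrip4 c))) (fun x => x) false).Pairwise (· ≤ ·) := by
    simpa using PySem.List.sorted_pairwise (cards.map (fun c => pvIdx (pvStrip4 c))) (fun x => x)
  have hmem : ∀ x ∈ PySem.List.sorted (cards.map (fun c => pvIdx (pvStrip4 c))) (fun x => x) false, x ∈ pvU := by
    intro x hx
    obtain ⟨c, hc, rfl⟩ := List.mem_map.mp (hperm.mem_iff.mp hx)
    exact List.mem_map.mpr ⟨pvStrip4 c, hpre c hc, rfl⟩
  -- the scan result equals the number of ranks occurring ≥ 4 times among the stripped cards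
  have hbridge : ∀ (g : Int → Bool),
      (∀ u, g u = decide ((4:Int) ≤ (((cards.map (fun c => pvIdx (pvStrip4 c))).count u : Nat) : Int))) →
      pvU.countP g = pvRanks.countP (fun r => decide ((4:Int) ≤ (((cards.map pvStrip4).count r) : Int))) := by
    intro g hg
    unfold pvU
    rw [List.countP_map]
    apply List.countP_congr
    intro r hr
    have : g (pvIdx r) = decide ((4:Int) ≤ (((cards.map pvStrip4).count r : Nat) : Int)) := by
      rw [hg (pvIdx r), hkeys,
        pv_count_idx (cards.map pvStrip4) (by
          intro s hs
          obtain ⟨c, hc, rfl⟩ := List.mem_map.mp hs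
          exact hpre c hc) r hr]
    simp [Function.comp, this]
  cases hsl : PySem.List.sorted (cards.map (fun c => pvIdx (pvStrip4 c))) (fun x => x) false with
  | nil =>
    rw [hsl] at hperm
    have hnil : cards = [] := List.map_eq_nil_iff.mp hperm.symm.eq_nil
    subst hnil
    simp
  | cons x xs =>
    rw [hsl] at hperm hpair hmem
    have hxle : ∀ y ∈ xs, x ≤ y := (List.pairwise_cons.mp hpair).1
    have hxs : xs.Pairwise (· ≤ ·) := (List.pairwise_cons.mp hpair).2
    have hxmem : x ∈ pvU := hmem x List.mem_cons_self
    have hmem' : ∀ y ∈ xs, y ∈ pvU := fun y hy => hmem y (List.mem_cons_of_mem _ hy)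
    have hstep0 : pvStep (0, none, 0) x = (0, some x, 1) := by simp [pvStep]
    have hscan := pv_scan_eq xs x 0 1 hxs hxle hxmem hmem'
    simp only [] at hscan
    rw [List.foldl_cons, hstep0, hscan]
    have hcnt : (pvU.countP (fun r => decide ((4:Int) ≤ (if r = x then 1 else 0) + (xs.count r : Int))))
        = pvRanks.countP (fun r => decide ((4:Int) ≤ (((cards.map pvStrip4).count r) : Int))) := by
      apply hbridge
      intro u
      refine decide_eq_decide.mpr ?_
      rw [← hperm.count_eq u, List.count_cons]
      by_cases hrx : u = x
      · subst hrx
        simp only [BEq.rfl, if_true]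
        push_cast; omega
      · have hb : (x == u) = false := beq_eq_false_iff_ne.mpr (fun h => hrx h.symm)
        simp [hb, hrx]
    rw [hcnt]
    simp only [beq_iff_eq]
    split_ifs with h
    · symm; rw [decide_eq_true_eq]; omega
    · symm; rw [decide_eq_false_iff_not]; omega
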